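-- pv_equiv track=rewrite | github.com/oysters76/pyautomata | min.py | remain
-- ===== SOURCE A (Python) =====
-- def remain(unmarked, Q):
--     l = []
--     for q in Q:
--         is_uniq = True
--         for s in unmarked:
--             if q in s:
--                 is_uniq = False
--                 break
--         if is_uniq:
--             l.append(q)
--     return set(l)
-- ===== SOURCE B (Python) =====
-- def remain(unmarked, Q):
--     result = set(Q)
--     for s in unmarked:
--         for e in s:
--             result.discard(e)
--     return result
-- ===== Notes on version B (the rewrite author's own statement) =====
-- stated objective: faster
-- what changed: Inverts the traversal: instead of testing each q in Q against every set in unmarked (with an inner break), B builds the candidate set set(Q) once and discards every element occurring in any unmarked set from it.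
import Mathlib
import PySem

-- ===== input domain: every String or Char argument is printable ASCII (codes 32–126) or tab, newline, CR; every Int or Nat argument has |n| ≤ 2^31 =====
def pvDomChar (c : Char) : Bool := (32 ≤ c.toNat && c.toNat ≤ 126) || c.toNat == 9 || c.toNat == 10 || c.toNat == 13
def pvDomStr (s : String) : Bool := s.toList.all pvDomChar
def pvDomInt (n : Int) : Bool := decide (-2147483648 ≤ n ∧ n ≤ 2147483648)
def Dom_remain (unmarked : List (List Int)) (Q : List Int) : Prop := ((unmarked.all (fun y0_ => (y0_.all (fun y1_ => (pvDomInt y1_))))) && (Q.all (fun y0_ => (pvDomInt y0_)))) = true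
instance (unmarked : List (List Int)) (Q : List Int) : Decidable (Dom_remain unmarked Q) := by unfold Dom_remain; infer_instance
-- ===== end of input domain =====

-- B inverts the traversal (subtract every forbidden element from set(Q) once) for an asymptotic speedup; return value only, no mutation.

-- ===== PORT A =====
def remain (unmarked : List (List Int)) (Q : List Int) : List Int :=
  PySem.Set.ofList
    (Q.foldl (fun l q =>
      -- inner 'for s in unmarked: if q in s: is_uniq=False; break' = a search loop
      let is_uniq := !(unmarked.any (fun s => s.contains q))
      if is_uniq then l ++ [q] else l) [])

-- ===== PORT B =====
def remain_alt (unmarked : List (List Int)) (Q : List Int) : List Int :=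
  unmarked.foldl (fun r s => s.foldl (fun r e => PySem.Set.discard r e) r)
    (PySem.Set.ofList Q)

-- ===== PRECONDITION & SPEC =====
def Spec_remain (unmarked : List (List Int)) (Q : List Int) (out : List Int) : Prop := out = remain_alt unmarked Q
instance (unmarked : List (List Int)) (Q : List Int) (out : List Int) : Decidable (Spec_remain unmarked Q out) := by unfold Spec_remain; infer_instance

-- ===== CLAIM (what is proved, stated in full; the proofs are below) =====
def Claim_equal_remain : Prop := ∀ (unmarked : List (List Int)) (Q : List Int), Dom_remain unmarked Q → Spec_remain unmarked Q (remain unmarked Q)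

-- ===== LEMMAS AND PROOFS =====

-- an inner 'for e in s: r.discard(e)' loop is one filter
lemma foldl_discard (es r : List Int) :
    es.foldl (fun r e => PySem.Set.discard r e) r = r.filter (fun q => !es.contains q) := by
  induction es generalizing r with
  | nil => simp
  | cons e es ih =>
      rw [List.foldl_cons, ih, PySem.Set.discard, List.filter_filter]
      apply List.filter_congr
      intro x _
      by_cases hxe : x = e <;> simp [hxe, Bool.and_comm]

-- B's whole loop nest is one filter over the candidate set
lemma foldl_foldl_discard (unmarked : List (List Int)) (r : List Int) :
    unmarked.foldl (fun r s => s.foldl (fun r e => PySem.Set.discard r e) r) r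
      = r.filter (fun q => !(unmarked.any (fun s => s.contains q))) := by
  induction unmarked generalizing r with
  | nil => simp
  | cons s rest ih =>
      rw [List.foldl_cons, foldl_discard, ih, List.filter_filter]
      apply List.filter_congr
      intro x _
      simp [List.any_cons, Bool.and_comm]

-- dedup commutes with filter
lemma ofList_filter (p : Int → Bool) (xs : List Int) :
    PySem.Set.ofList (xs.filter p) = (PySem.Set.ofList xs).filter p := by
  induction xs with
  | nil => simp
  | cons x xs ih =>
      by_cases hp : p x = true
      · rw [List.filter_cons_of_pos hp, PySem.Set.ofList_cons, PySem.Set.ofList_cons, ih,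
          PySem.Set.discard, PySem.Set.discard, List.filter_cons_of_pos hp, List.filter_filter,
          List.filter_filter]
        congr 1
        apply List.filter_congr
        intro y _
        exact Bool.and_comm _ _
      · have hp' : p x = false := by simpa using hp
        rw [List.filter_cons_of_neg (by simp [hp']), PySem.Set.ofList_cons, ih, PySem.Set.discard,
          List.filter_cons_of_neg (by simp [hp']), List.filter_filter]
        apply List.filter_congr
        intro y hy
        cases hyx : (y == x)
        · simp
        · have : y = x := by simpa using hyx
          simp [this, hp']

-- ===== VERDICT (by name: the statement is the Claim_ definition above) =====
theorem remain_spec : Claim_equal_remain := by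
  intro unmarked Q _
  unfold Spec_remain remain remain_alt
  rw [PySem.List.foldl_append_if_eq_filter, List.nil_append, foldl_foldl_discard, ofList_filter]
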